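-- pv_equiv track=rewrite | github.com/CluelessCoder73/ExactCut-Video-Tools | vdscript_range_adjuster.py | find_nth_previous_i_frame
-- ===== SOURCE A (Python) =====
-- def find_nth_previous_i_frame(frame_num, frame_types, n):
--     i_frames_found = 0
--     while frame_num >= 0:
--         if frame_types.get(frame_num) == 'I':
--             i_frames_found += 1
--             if i_frames_found == n:
--                 return frame_num
--         frame_num -= 1
--     return 0  # Return 0 if we can't find enough I-frames
-- ===== SOURCE B (Python) =====
-- def find_nth_previous_i_frame(frame_num, frame_types, n):
--     positions = sorted((k for k in frame_types
--                         if frame_types[k] == 'I' and 0 <= k <= frame_num),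
--                        reverse=True)
--     if 1 <= n <= len(positions):
--         return positions[n - 1]
--     return 0
-- ===== Notes on version B (the rewrite author's own statement) =====
-- stated objective: alternative
-- what changed: Replaces the frame-by-frame backward countdown (one dict lookup per candidate frame number) with a single pass over the dict's keys collecting the qualifying I-frame positions, a descending sort, and direct selection of the (n-1)-th element.
import Mathlib
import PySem

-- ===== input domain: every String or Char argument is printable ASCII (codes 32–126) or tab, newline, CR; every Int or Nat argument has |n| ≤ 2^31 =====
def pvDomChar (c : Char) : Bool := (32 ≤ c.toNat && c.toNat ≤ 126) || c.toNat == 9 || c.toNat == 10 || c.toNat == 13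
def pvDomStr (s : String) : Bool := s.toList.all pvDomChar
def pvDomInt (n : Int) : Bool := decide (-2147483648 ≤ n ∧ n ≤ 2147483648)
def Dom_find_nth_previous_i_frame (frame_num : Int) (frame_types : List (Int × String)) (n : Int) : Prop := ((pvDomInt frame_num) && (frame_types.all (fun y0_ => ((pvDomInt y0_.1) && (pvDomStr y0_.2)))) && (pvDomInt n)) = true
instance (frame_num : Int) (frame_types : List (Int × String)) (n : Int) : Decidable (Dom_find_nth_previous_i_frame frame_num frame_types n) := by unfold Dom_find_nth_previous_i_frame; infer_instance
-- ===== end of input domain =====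

-- B replaces A's frame-by-frame backward countdown with one pass over the dict's
-- keys collecting the qualifying I-frame positions, a descending sort and direct
-- selection of the (n-1)-th element (objective: alternative algorithm, same cost).

-- ===== PORT A =====
-- A's while loop: frame_num counts down to 0; fuel = frame_num+1 iterations remain.
def findA (frame_types : List (Int × String)) (n : Int) : Nat → Int → Int → Int
  | 0, _, _ => 0
  | fuel + 1, fn, cnt =>
      if (PySem.Dict.mk frame_types).get? fn = some "I" then
        if cnt + 1 = n then fn
        else findA frame_types n fuel (fn - 1) (cnt + 1)
      else findA frame_types n fuel (fn - 1) cnt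

def find_nth_previous_i_frame (frame_num : Int) (frame_types : List (Int × String)) (n : Int) : Int :=
  findA frame_types n (frame_num + 1).toNat frame_num 0

-- ===== PORT B =====
def find_nth_previous_i_frame_alt (frame_num : Int) (frame_types : List (Int × String)) (n : Int) : Int :=
  let d := PySem.Dict.mk frame_types
  let positions := PySem.List.sorted
      ((PySem.List.dedup (frame_types.map Prod.fst)).filter
        (fun k => d.get? k == some "I" && decide (0 ≤ k) && decide (k ≤ frame_num)))
      (fun x => x) true
  if 1 ≤ n ∧ n ≤ (positions.length : Int) then (positions[(n - 1).toNat]?).getD 0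
  else 0

-- ===== PRECONDITION & SPEC =====
def Spec_find_nth_previous_i_frame (frame_num : Int) (frame_types : List (Int × String)) (n : Int) (out : Int) : Prop := out = find_nth_previous_i_frame_alt frame_num frame_types n
instance (frame_num : Int) (frame_types : List (Int × String)) (n : Int) (out : Int) : Decidable (Spec_find_nth_previous_i_frame frame_num frame_types n out) := by unfold Spec_find_nth_previous_i_frame; infer_instance

-- ===== CLAIM (what is proved, stated in full; the proofs are below) =====
def Claim_equal_find_nth_previous_i_frame : Prop := ∀ (frame_num : Int) (frame_types : List (Int × String)) (n : Int), Dom_find_nth_previous_i_frame frame_num frame_types n → Spec_find_nth_previous_i_frame frame_num frame_types n (find_nth_previous_i_frame frame_num frame_types n)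

-- ===== LEMMAS AND PROOFS =====

-- K ft t : the qualifying I-frame positions ≤ t;  P ft t : them, sorted descending.
def pvK (ft : List (Int × String)) (t : Int) : List Int :=
  (PySem.List.dedup (ft.map Prod.fst)).filter
    (fun k => (PySem.Dict.mk ft).get? k == some "I" && decide (0 ≤ k) && decide (k ≤ t))

def pvP (ft : List (Int × String)) (t : Int) : List Int :=
  PySem.List.sorted (pvK ft t) (fun x => x) true

-- selection of the r-th element (1-based) of l, defaulting to 0
def pvSel (l : List Int) (r : Int) : Int :=
  if 1 ≤ r ∧ r ≤ (l.length : Int) then (l[(r - 1).toNat]?).getD 0 else 0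

theorem alt_eq_sel (fn : Int) (ft : List (Int × String)) (n : Int) :
    find_nth_previous_i_frame_alt fn ft n = pvSel (pvP ft fn) n := rfl

theorem mem_pvK (ft : List (Int × String)) (t x : Int) :
    x ∈ pvK ft t ↔ x ∈ PySem.List.dedup (ft.map Prod.fst) ∧
      (PySem.Dict.mk ft).get? x = some "I" ∧ 0 ≤ x ∧ x ≤ t := by
  simp [pvK, List.mem_filter, Bool.and_eq_true, and_assoc]

theorem mem_pvP (ft : List (Int × String)) (t x : Int) :
    x ∈ pvP ft t ↔ x ∈ pvK ft t := PySem.List.mem_sorted _ _ _ _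

theorem pvK_nodup (ft : List (Int × String)) (t : Int) : (pvK ft t).Nodup :=
  (PySem.List.nodup_dedup _).filter _

theorem pvP_nodup (ft : List (Int × String)) (t : Int) : (pvP ft t).Nodup :=
  ((PySem.List.sorted_perm (xs := pvK ft t) (key := fun x => x) (rev := true)).nodup_iff).mpr
    (pvK_nodup ft t)

theorem mem_keys_of_get?_mk {l : List (Int × String)} {k : Int} {v : String}
    (h : (PySem.Dict.mk l).get? k = some v) : k ∈ l.map Prod.fst := by
  induction l with
  | nil => simp [PySem.Dict.get?] at h
  | cons p rest ih =>
    rw [show (p :: rest : List (Int × String)) = (p.1, p.2) :: rest from rfl,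
      PySem.Dict.get?_mk_cons] at h
    by_cases hk : p.1 = k
    · simp [hk]
    · simp [hk] at h
      simp [ih h]

theorem pvP_neg (ft : List (Int × String)) (t : Int) (ht : t < 0) : pvP ft t = [] := by
  have hK : pvK ft t = [] := by
    apply List.filter_eq_nil_iff.mpr
    intro k _
    simp only [Bool.and_eq_true, decide_eq_true_iff]
    omega
  rw [pvP, hK]
  exact (PySem.List.sorted_eq_nil_iff _ _ _).mpr rfl

theorem pvK_filter_ne (ft : List (Int × String)) (t : Int) :
    (pvK ft t).filter (· != t) = pvK ft (t - 1) := by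
  unfold pvK
  rw [List.filter_filter]
  apply List.filter_congr
  intro k _
  rcases Bool.eq_false_or_eq_true ((PySem.Dict.mk ft).get? k == some "I") with hv | hv
  · rw [Bool.eq_iff_iff]
    simp only [hv, Bool.true_and, Bool.and_eq_true, bne_iff_ne, ne_eq, decide_eq_true_iff]
    omega
  · simp [hv]

theorem pvK_perm (ft : List (Int × String)) (t : Int)
    (h : (PySem.Dict.mk ft).get? t = some "I") (ht : 0 ≤ t) :
    (pvK ft t).Perm (t :: pvK ft (t - 1)) := by
  have hmem : t ∈ pvK ft t := by
    rw [mem_pvK]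
    exact ⟨(PySem.List.mem_dedup _ _).mpr (mem_keys_of_get?_mk h), h, ht, le_refl t⟩
  have h1 := List.perm_cons_erase hmem
  rwa [(pvK_nodup ft t).erase_eq_filter t, pvK_filter_ne] at h1

theorem pvK_pred (ft : List (Int × String)) (t : Int)
    (h : ¬ ((PySem.Dict.mk ft).get? t = some "I" ∧ 0 ≤ t)) :
    pvK ft t = pvK ft (t - 1) := by
  unfold pvK
  apply List.filter_congr
  intro k _
  rcases Bool.eq_false_or_eq_true ((PySem.Dict.mk ft).get? k == some "I") with hv | hv
  · have hv' : (PySem.Dict.mk ft).get? k = some "I" := by simpa using hv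
    rw [Bool.eq_iff_iff]
    simp only [hv, Bool.true_and, Bool.and_eq_true, decide_eq_true_iff]
    by_cases hk : k = t
    · subst hk
      have hnt : ¬ 0 ≤ k := fun hc => h ⟨hv', hc⟩
      omega
    · omega
  · simp [hv]

theorem pvP_step (ft : List (Int × String)) (t : Int) :
    pvP ft t = if (PySem.Dict.mk ft).get? t = some "I" ∧ 0 ≤ t
      then t :: pvP ft (t - 1) else pvP ft (t - 1) := by
  split_ifs with h
  · apply PySem.List.sorted_rev_eq_of_perm_of_pairwise_gt
    · exact (List.Perm.cons t (PySem.List.sorted_perm _ _ _)).trans (pvK_perm ft t h.1 h.2).symm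
    · rw [List.pairwise_cons]
      constructor
      · intro b hb
        have := ((mem_pvK ft (t - 1) b).mp ((mem_pvP ft (t - 1) b).mp hb)).2.2.2
        omega
      · have hle := PySem.List.sorted_pairwise_rev (xs := pvK ft (t - 1)) (key := fun x => x)
        have hne : (pvP ft (t - 1)).Pairwise (fun a b => a ≠ b) := pvP_nodup ft (t - 1)
        exact (hle.and hne).imp (fun hx => lt_of_le_of_ne hx.1 hx.2.symm)
  · rw [pvP, pvP, pvK_pred ft t h]

theorem pvSel_cons (a : Int) (l : List Int) (r : Int) :
    pvSel (a :: l) r = if r = 1 then a else pvSel l (r - 1) := by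
  unfold pvSel
  by_cases hr : r = 1
  · simp [hr]
  · rw [if_neg hr]
    by_cases hg : 1 ≤ r ∧ r ≤ ((a :: l).length : Int)
    · have h2 : 2 ≤ r := by omega
      have hlen : r ≤ (l.length : Int) + 1 := by
        have h3 := hg.2
        rw [List.length_cons] at h3
        push_cast at h3 ⊢
        omega
      have ht : (r - 1).toNat = (r - 1 - 1).toNat + 1 := by omega
      rw [if_pos hg, ht, List.getElem?_cons_succ,
        if_pos (show 1 ≤ r - 1 ∧ r - 1 ≤ (l.length : Int) from ⟨by omega, by omega⟩)]
    · rw [if_neg hg, if_neg]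
      rintro ⟨hc1, hc2⟩
      apply hg
      refine ⟨by omega, ?_⟩
      rw [List.length_cons]
      push_cast at hc2 ⊢
      omega

theorem findA_eq_sel (ft : List (Int × String)) (n : Int) (m : Nat) (cnt : Int) :
    findA ft n (m + 1) (m : Int) cnt = pvSel (pvP ft (m : Int)) (n - cnt) := by
  induction m generalizing cnt with
  | zero =>
    simp only [Nat.cast_zero]
    have hneg : pvP ft ((0 : Int) - 1) = [] := pvP_neg ft ((0 : Int) - 1) (by omega)
    rw [pvP_step ft 0,
      show findA ft n (0 + 1) 0 cnt = (if (PySem.Dict.mk ft).get? 0 = some "I" then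
        if cnt + 1 = n then (0 : Int) else findA ft n 0 (0 - 1) (cnt + 1)
        else findA ft n 0 (0 - 1) cnt) from rfl]
    by_cases h : (PySem.Dict.mk ft).get? (0 : Int) = some "I"
    · rw [if_pos h,
        if_pos (show _ ∧ (0 : Int) ≤ 0 from ⟨h, le_refl (0 : Int)⟩),
        pvSel_cons, hneg]
      by_cases hc : cnt + 1 = n
      · rw [if_pos hc, if_pos (by omega)]
      · rw [if_neg hc, if_neg (by omega)]
        show (0 : Int) = pvSel [] (n - cnt - 1)
        rw [pvSel, if_neg (by simp; omega)]
    · rw [if_neg h, if_neg (fun hc => h hc.1), hneg]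
      show (0 : Int) = pvSel [] (n - cnt)
      rw [pvSel, if_neg (by simp; omega)]
  | succ m ih =>
    rw [pvP_step ft ((m + 1 : Nat) : Int)]
    have hsub : ((m + 1 : Nat) : Int) - 1 = (m : Int) := by push_cast; ring
    rw [show findA ft n (m + 1 + 1) ((m + 1 : Nat) : Int) cnt =
        (if (PySem.Dict.mk ft).get? ((m + 1 : Nat) : Int) = some "I" then
          if cnt + 1 = n then ((m + 1 : Nat) : Int)
          else findA ft n (m + 1) (((m + 1 : Nat) : Int) - 1) (cnt + 1)
        else findA ft n (m + 1) (((m + 1 : Nat) : Int) - 1) cnt) from rfl]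
    by_cases h : (PySem.Dict.mk ft).get? ((m + 1 : Nat) : Int) = some "I"
    · rw [if_pos h,
        if_pos (show _ ∧ (0 : Int) ≤ ((m + 1 : Nat) : Int) from ⟨h, by positivity⟩),
        hsub, pvSel_cons]
      by_cases hc : cnt + 1 = n
      · rw [if_pos hc, if_pos (by omega)]
      · rw [if_neg hc, if_neg (by omega), ih (cnt + 1)]
        congr 1
        omega
    · rw [if_neg h, if_neg (fun hc => h hc.1), hsub, ih cnt]

-- ===== VERDICT (by name: the statement is the Claim_ definition above) =====
theorem find_nth_previous_i_frame_spec : Claim_equal_find_nth_previous_i_frame := by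
  intro fn ft n _
  unfold Spec_find_nth_previous_i_frame find_nth_previous_i_frame
  rw [alt_eq_sel]
  by_cases h : fn < 0
  · have h1 : (fn + 1).toNat = 0 := by omega
    rw [h1, pvP_neg ft fn h]
    simp [findA, pvSel]
  · have h2 : (fn + 1).toNat = fn.toNat + 1 := by omega
    have h3 : ((fn.toNat : Int)) = fn := by omega
    rw [h2, ← h3]
    simp only [Int.toNat_natCast]
    rw [findA_eq_sel]
    norm_num
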